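-- pv_equiv track=rewrite | github.com/bjuice1/it-diligence-agent | services/org_assumption_engine.py | _infer_layer_from_title
-- ===== SOURCE A (Python) =====
-- from typing import List, Dict, Any, Optional
--
-- ROLE_HIERARCHY_LEVELS = {
--     # Layer 0 (C-Suite)
--     'cio': 0,
--     'cto': 0,
--     'ciso': 0,
--     'chief information officer': 0,
--     'chief technology officer': 0,
--     'chief information security officer': 0,
--
--     # Layer 1 (VPs)
--     'vp': 1,
--     'vice president': 1,
--     'svp': 1,
--     'senior vice president': 1,
--     'head of': 1,
--
--     # Layer 2 (Directors)
--     'director': 2,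
--     'senior director': 2,
--     'associate director': 2,
--
--     # Layer 3 (Managers)
--     'manager': 3,
--     'senior manager': 3,
--     'lead': 3,
--     'team lead': 3,
--     'supervisor': 3,
--
--     # Layer 4 (ICs)
--     'engineer': 4,
--     'senior engineer': 4,
--     'analyst': 4,
--     'senior analyst': 4,
--     'specialist': 4,
--     'administrator': 4,
--     'architect': 4,
--     'consultant': 4
-- }
--
-- def _infer_layer_from_title(title: str) -> Optional[int]:
--     """Infer management layer from role title.
--
--     Returns layer number (0=C-suite, 4=IC) or None if ambiguous.
--
--     Note: Checks keywords from longest to shortest to avoid partial matches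
--     (e.g., "director" should match before "cio" even though both might
--     technically be substrings).
--     """
--     title_lower = title.lower()
--
--     # Sort keywords by length (longest first) to match most specific first
--     sorted_keywords = sorted(ROLE_HIERARCHY_LEVELS.items(),
--                            key=lambda x: len(x[0]),
--                            reverse=True)
--
--     for keyword, layer in sorted_keywords:
--         if keyword in title_lower:
--             return layer
--
--     return None
-- ===== SOURCE B (Python) =====
-- from typing import Optional
--
-- # Same keywords, grouped per layer (dict insertion order was already grouped by layer,
-- # so flattening this table reproduces the dict's iteration order exactly).
-- KEYWORDS_BY_LAYER = [
--     (0, ['cio', 'cto', 'ciso', 'chief information officer',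
--          'chief technology officer', 'chief information security officer']),
--     (1, ['vp', 'vice president', 'svp', 'senior vice president', 'head of']),
--     (2, ['director', 'senior director', 'associate director']),
--     (3, ['manager', 'senior manager', 'lead', 'team lead', 'supervisor']),
--     (4, ['engineer', 'senior engineer', 'analyst', 'senior analyst',
--          'specialist', 'administrator', 'architect', 'consultant']),
-- ]
--
--
-- def _infer_layer_from_title(title: str) -> Optional[int]:
--     """Single pass with a running best: keep the layer of the longest matching
--     keyword seen so far (strict '>' keeps the earliest on length ties, which is
--     exactly the tie-break of A's stable longest-first sort)."""
--     title_lower = title.lower()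
--     best_len, best = -1, None
--     for layer, keywords in KEYWORDS_BY_LAYER:
--         for kw in keywords:
--             if best_len < len(kw) and kw in title_lower:
--                 best_len, best = len(kw), layer
--     return best
-- ===== Notes on version B (the rewrite author's own statement) =====
-- stated objective: simpler
-- what changed: Replaced sort-keywords-by-length-then-return-first-substring-match with one pass over a per-layer keyword table keeping a running (best_len, best_layer) accumulator; a strict length comparison reproduces the stable sort's first-on-tie rule.
import Mathlib
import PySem

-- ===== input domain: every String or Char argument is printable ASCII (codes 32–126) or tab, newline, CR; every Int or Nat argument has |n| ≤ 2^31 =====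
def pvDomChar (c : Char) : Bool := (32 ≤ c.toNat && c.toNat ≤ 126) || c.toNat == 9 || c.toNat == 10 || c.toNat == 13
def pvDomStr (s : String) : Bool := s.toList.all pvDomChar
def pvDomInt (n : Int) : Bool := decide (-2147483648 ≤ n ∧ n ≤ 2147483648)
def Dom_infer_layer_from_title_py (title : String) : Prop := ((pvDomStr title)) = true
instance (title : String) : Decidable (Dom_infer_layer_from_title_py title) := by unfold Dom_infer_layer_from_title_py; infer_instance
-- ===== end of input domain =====

-- B replaces A's sort-then-first-match with one pass over a per-layer keyword table
-- keeping a running (best length, best layer) accumulator (simpler; same result).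

-- ===== PORT A =====
-- the module-level dict ROLE_HIERARCHY_LEVELS, as an association list in insertion order
def pvRoleHierarchyLevels : List (String × Int) :=
  [("cio", 0), ("cto", 0), ("ciso", 0),
   ("chief information officer", 0), ("chief technology officer", 0),
   ("chief information security officer", 0),
   ("vp", 1), ("vice president", 1), ("svp", 1),
   ("senior vice president", 1), ("head of", 1),
   ("director", 2), ("senior director", 2), ("associate director", 2),
   ("manager", 3), ("senior manager", 3), ("lead", 3), ("team lead", 3), ("supervisor", 3),
   ("engineer", 4), ("senior engineer", 4), ("analyst", 4), ("senior analyst", 4),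
   ("specialist", 4), ("administrator", 4), ("architect", 4), ("consultant", 4)]

-- the 'for keyword, layer in sorted_keywords: if keyword in title_lower: return layer' loop
def pvFindLoopA (tl : String) : List (String × Int) → Option Int
  | [] => none
  | (kw, layer) :: rest => if PySem.Str.isIn kw tl then some layer else pvFindLoopA tl rest

def infer_layer_from_title_py (title : String) : Option Int :=
  let title_lower := PySem.Str.lower title
  let sorted_keywords :=
    PySem.List.sorted pvRoleHierarchyLevels (fun x => PySem.Str.len x.1) true
  pvFindLoopA title_lower sorted_keywords

-- ===== PORT B =====
-- B's module-level table KEYWORDS_BY_LAYER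
def pvKeywordsByLayer : List (Int × List String) :=
  [(0, ["cio", "cto", "ciso", "chief information officer",
        "chief technology officer", "chief information security officer"]),
   (1, ["vp", "vice president", "svp", "senior vice president", "head of"]),
   (2, ["director", "senior director", "associate director"]),
   (3, ["manager", "senior manager", "lead", "team lead", "supervisor"]),
   (4, ["engineer", "senior engineer", "analyst", "senior analyst",
        "specialist", "administrator", "architect", "consultant"])]

def infer_layer_from_title_py_alt (title : String) : Option Int :=
  let title_lower := PySem.Str.lower title
  (pvKeywordsByLayer.foldl
    (fun acc g =>
      g.2.foldl
        (fun acc kw =>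
          if decide (acc.1 < PySem.Str.len kw) && PySem.Str.isIn kw title_lower
          then (PySem.Str.len kw, some g.1) else acc)
        acc)
    ((-1 : Int), (none : Option Int))).2

-- ===== PRECONDITION & SPEC =====
def Spec_infer_layer_from_title_py (title : String) (out : Option Int) : Prop := out = infer_layer_from_title_py_alt title
instance (title : String) (out : Option Int) : Decidable (Spec_infer_layer_from_title_py title out) := by unfold Spec_infer_layer_from_title_py; infer_instance

-- ===== CLAIM (what is proved, stated in full; the proofs are below) =====
def Claim_equal_infer_layer_from_title_py : Prop := ∀ (title : String), Dom_infer_layer_from_title_py title → Spec_infer_layer_from_title_py title (infer_layer_from_title_py title)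

-- ===== LEMMAS AND PROOFS =====

-- key and comparison used by A's sort (reverse=True, key = len of the keyword)
def pvKey (kv : String × Int) : Int := PySem.Str.len kv.1
def pvBefore (a b : String × Int) : Bool := decide (pvKey b < pvKey a)
def pvR (a b : String × Int) : Prop := pvKey b ≤ pvKey a
def pvStep (best kv : String × Int) : String × Int :=
  if pvKey best < pvKey kv then kv else best
def pvFirstMax? : List (String × Int) → Option (String × Int)
  | [] => none
  | c :: cs => some (cs.foldl pvStep c)

-- B's inner loop body, over a flattened (keyword, layer) pair
def pvBStep (Q : String × Int → Bool) (acc : Int × Option Int) (kv : String × Int) :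
    Int × Option Int :=
  if decide (acc.1 < pvKey kv) && Q kv then (pvKey kv, some kv.2) else acc

lemma pvSorted_eq (l : List (String × Int)) :
    PySem.List.sorted l (fun x => PySem.Str.len x.1) true =
      l.foldl (fun acc x => PySem.List.insertBy pvBefore x acc) [] := rfl

lemma pvFindLoopA_eq (tl : String) (l : List (String × Int)) :
    pvFindLoopA tl l = (l.find? (fun kv => PySem.Str.isIn kv.1 tl)).map Prod.snd := by
  induction l with
  | nil => rfl
  | cons c rest ih =>
      obtain ⟨kw, layer⟩ := c
      rw [List.find?_cons]
      cases h : PySem.Str.isIn kw tl <;> simp only [pvFindLoopA, h, ih] <;> simp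

lemma pvPairwise_insertBy (x : String × Int) (ys : List (String × Int))
    (h : ys.Pairwise pvR) : (PySem.List.insertBy pvBefore x ys).Pairwise pvR := by
  induction ys with
  | nil => simp [PySem.List.insertBy]
  | cons y ys ih =>
      rcases List.pairwise_cons.mp h with ⟨hy, hys⟩
      by_cases hb : pvBefore x y = true
      · have hlt : pvKey y < pvKey x := of_decide_eq_true hb
        simp only [PySem.List.insertBy, hb, if_pos]
        refine List.pairwise_cons.mpr ⟨?_, h⟩
        intro z hz
        rcases List.mem_cons.mp hz with rfl | hz
        · exact le_of_lt hlt
        · exact le_trans (hy z hz) (le_of_lt hlt)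
      · have hle : pvKey x ≤ pvKey y := by
          have := of_decide_eq_false (eq_false_of_ne_true hb); unfold pvBefore at hb
          simp at hb; exact hb
        simp only [PySem.List.insertBy, hb, if_neg, Bool.false_eq_true, not_false_iff]
        refine List.pairwise_cons.mpr ⟨?_, ih hys⟩
        intro z hz
        rcases (PySem.List.mem_insertBy pvBefore x z ys).mp hz with rfl | hz
        · exact hle
        · exact hy z hz

lemma pvPairwise_foldl (l : List (String × Int)) :
    ∀ acc : List (String × Int), acc.Pairwise pvR →
      (l.foldl (fun acc x => PySem.List.insertBy pvBefore x acc) acc).Pairwise pvR := by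
  induction l with
  | nil => intro acc h; simpa using h
  | cons x l ih =>
      intro acc h
      exact ih _ (pvPairwise_insertBy x acc h)

-- core: find? after inserting x into a length-descending list
lemma pvFind_insertBy (Q : String × Int → Bool) (x : String × Int)
    (S : List (String × Int)) (hS : S.Pairwise pvR) :
    (PySem.List.insertBy pvBefore x S).find? Q =
      match S.find? Q with
      | none => if Q x then some x else none
      | some b => if Q x && decide (pvKey b < pvKey x) then some x else some b := by
  induction S with
  | nil =>
      by_cases hq : Q x <;> simp [PySem.List.insertBy, List.find?, hq]
  | cons y ys ih =>
      rcases List.pairwise_cons.mp hS with ⟨hy, hys⟩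
      by_cases hb : pvBefore x y = true
      · have hlt : pvKey y < pvKey x := of_decide_eq_true hb
        simp only [PySem.List.insertBy, hb, if_pos]
        by_cases hq : Q x
        · rw [List.find?_cons, hq]
          cases hf : (y :: ys).find? Q with
          | none => simp
          | some b =>
              have hble : pvKey b ≤ pvKey y := by
                rcases List.mem_cons.mp (List.mem_of_find?_eq_some hf) with rfl | hm
                · exact le_refl _
                · exact hy b hm
              have hd : decide (pvKey b < pvKey x) = true :=
                decide_eq_true (lt_of_le_of_lt hble hlt)
              simp [hd]
        · rw [List.find?_cons, eq_false_of_ne_true hq]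
          cases hf : (y :: ys).find? Q with
          | none => simp
          | some b => simp
      · have hle : pvKey x ≤ pvKey y := by unfold pvBefore at hb; simp at hb; exact hb
        simp only [PySem.List.insertBy, hb, if_neg, Bool.false_eq_true, not_false_iff]
        by_cases hqy : Q y
        · rw [List.find?_cons, List.find?_cons, hqy]
          have hd : decide (pvKey y < pvKey x) = false := decide_eq_false (not_lt.mpr hle)
          simp only []
          cases hq : Q x <;> simp [hd]
        · rw [List.find?_cons, List.find?_cons, eq_false_of_ne_true hqy]
          exact ih hys

lemma pvFirstMax?_append (ys : List (String × Int)) (x : String × Int) :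
    pvFirstMax? (ys ++ [x]) =
      some (match pvFirstMax? ys with | none => x | some b => pvStep b x) := by
  cases ys with
  | nil => rfl
  | cons c cs => simp [pvFirstMax?, List.foldl_append]

-- main invariant on A's side: first match of the stable length-descending sort
-- equals the first maximal-length element of the matching keywords in dict order
lemma pvMain (Q : String × Int → Bool) (l : List (String × Int)) :
    (l.foldl (fun acc x => PySem.List.insertBy pvBefore x acc) []).find? Q =
      pvFirstMax? (l.filter Q) := by
  induction l using List.reverseRecOn with
  | nil => rfl
  | append_singleton l x ih =>
      rw [List.foldl_append, List.filter_append]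
      simp only [List.foldl_cons, List.foldl_nil]
      rw [pvFind_insertBy Q x _ (pvPairwise_foldl l [] (by simp))]
      by_cases hq : Q x
      · simp only [List.filter_cons, List.filter_nil, hq, if_pos]
        rw [pvFirstMax?_append, ← ih]
        cases hf : (l.foldl (fun acc x => PySem.List.insertBy pvBefore x acc) []).find? Q with
        | none => simp
        | some b =>
            have hs : pvStep b x = if pvKey b < pvKey x then x else b := rfl
            simp only [Bool.true_and, hs, apply_ite some]
            simp
      · simp only [List.filter_cons, List.filter_nil, hq, if_neg, Bool.false_eq_true,
          not_false_iff, List.append_nil, ← ih]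
        cases hf : (l.foldl (fun acc x => PySem.List.insertBy pvBefore x acc) []).find? Q with
        | none => simp
        | some b => simp

lemma pvKey_nonneg (kv : String × Int) : 0 ≤ pvKey kv := by
  simp [pvKey, PySem.Str.len_eq]

-- B's running-best fold computes (length, layer) of the first maximal-length match
lemma pvBfold (Q : String × Int → Bool) (l : List (String × Int)) :
    l.foldl (pvBStep Q) (-1, none) =
      match pvFirstMax? (l.filter Q) with
      | none => (-1, none)
      | some b => (pvKey b, some b.2) := by
  induction l using List.reverseRecOn with
  | nil => rfl
  | append_singleton l x ih =>
      rw [List.foldl_append, List.filter_append, List.foldl_cons, List.foldl_nil, ih]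
      by_cases hq : Q x
      · simp only [List.filter_cons, List.filter_nil, hq, if_pos, pvFirstMax?_append]
        cases hf : pvFirstMax? (l.filter Q) with
        | none =>
            have h1 : decide ((-1 : Int) < pvKey x) = true :=
              decide_eq_true (lt_of_lt_of_le (by norm_num) (pvKey_nonneg x))
            simp [pvBStep, h1, hq]
        | some b =>
            simp only [pvBStep, hq, Bool.and_true, pvStep]
            by_cases hlt : pvKey b < pvKey x
            · simp [hlt]
            · simp [hlt]
      · simp only [List.filter_cons, List.filter_nil, hq, if_neg, Bool.false_eq_true,
          not_false_iff, List.append_nil]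
        simp [pvBStep, hq]

-- B's nested fold over the grouped table is the flat fold over the dict's pairs
lemma pvGrouped_eq (tl : String) :
    (pvKeywordsByLayer.foldl
      (fun acc g =>
        g.2.foldl
          (fun acc kw =>
            if decide (acc.1 < PySem.Str.len kw) && PySem.Str.isIn kw tl
            then (PySem.Str.len kw, some g.1) else acc)
          acc)
      ((-1 : Int), (none : Option Int))) =
    pvRoleHierarchyLevels.foldl (pvBStep (fun kv => PySem.Str.isIn kv.1 tl)) (-1, none) := by
  set_option maxRecDepth 4000 in rfl

-- ===== VERDICT (by name: the statement is the Claim_ definition above) =====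
theorem infer_layer_from_title_py_spec : Claim_equal_infer_layer_from_title_py := by
  intro title _
  unfold Spec_infer_layer_from_title_py infer_layer_from_title_py infer_layer_from_title_py_alt
  simp only [pvSorted_eq, pvFindLoopA_eq, pvGrouped_eq,
    pvMain (fun kv => PySem.Str.isIn kv.1 (PySem.Str.lower title)),
    pvBfold (fun kv => PySem.Str.isIn kv.1 (PySem.Str.lower title))]
  cases hf : pvRoleHierarchyLevels.filter
      (fun kv => PySem.Str.isIn kv.1 (PySem.Str.lower title)) with
  | nil => rfl
  | cons c cs => simp [pvFirstMax?]
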